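-- pv_equiv track=rewrite | github.com/PalacioRestrepo/Python | programacion/equilibra.py | equilibraImpar
-- ===== SOURCE A (Python) =====
-- def equilibraImpar(arreglo1, arreglo2, personas, n):
--     if len(personas) == 0:
--         return arreglo2, arreglo1
--     else:
--         if len(personas) > n//2:
--             arreglo1.append(personas[0])
--             return equilibraImpar(arreglo1, arreglo2, personas[1:], n)
--         else:
--             arreglo2.append(personas[0])
--             return equilibraImpar(arreglo1, arreglo2, personas[1:], n)
-- ===== SOURCE B (Python) =====
-- def equilibraImpar(arreglo1, arreglo2, personas, n):
--     k = max(0, len(personas) - n // 2)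
--     return arreglo2 + personas[k:], arreglo1 + personas[:k]
-- ===== Notes on version B (the rewrite author's own statement) =====
-- stated objective: faster
-- what changed: Replaces A's one-element-at-a-time recursion (which copies the tail with personas[1:] at every step) by computing the split index k = max(0, len(personas) - n//2) once and returning the two halves with two slices.
import Mathlib
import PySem

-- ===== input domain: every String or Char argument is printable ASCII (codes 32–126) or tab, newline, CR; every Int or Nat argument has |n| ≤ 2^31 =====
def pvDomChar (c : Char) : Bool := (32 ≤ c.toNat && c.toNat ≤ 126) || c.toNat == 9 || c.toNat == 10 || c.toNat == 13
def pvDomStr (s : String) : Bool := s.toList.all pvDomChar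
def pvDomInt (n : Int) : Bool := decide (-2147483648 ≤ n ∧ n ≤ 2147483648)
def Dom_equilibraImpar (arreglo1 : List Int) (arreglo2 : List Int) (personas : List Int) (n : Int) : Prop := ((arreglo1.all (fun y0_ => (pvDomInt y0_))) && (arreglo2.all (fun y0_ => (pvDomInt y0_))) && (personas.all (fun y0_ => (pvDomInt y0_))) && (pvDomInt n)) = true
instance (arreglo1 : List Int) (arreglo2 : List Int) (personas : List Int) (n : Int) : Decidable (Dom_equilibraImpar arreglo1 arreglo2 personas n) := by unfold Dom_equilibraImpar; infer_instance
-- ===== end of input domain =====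

-- B computes the split index once and slices, instead of A's element-by-element recursion;
-- equivalence is about the RETURN value only: A appends to arreglo1/arreglo2 in place, B does not mutate.

-- ===== PORT A =====
def equilibraImpar (arreglo1 : List Int) (arreglo2 : List Int) (personas : List Int) (n : Int) : List Int × List Int :=
  match personas with
  | [] => (arreglo2, arreglo1)
  | x :: rest =>
    if ((x :: rest).length : Int) > PySem.Int.floordiv n 2 then
      equilibraImpar (arreglo1 ++ [x]) arreglo2 rest n
    else
      equilibraImpar arreglo1 (arreglo2 ++ [x]) rest n

-- ===== PORT B =====
def equilibraImpar_alt (arreglo1 : List Int) (arreglo2 : List Int) (personas : List Int) (n : Int) : List Int × List Int :=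
  let k := max 0 ((personas.length : Int) - PySem.Int.floordiv n 2)
  (arreglo2 ++ PySem.List.slice personas (some k) none,
   arreglo1 ++ PySem.List.slice personas none (some k))

-- ===== PRECONDITION & SPEC =====
def Spec_equilibraImpar (arreglo1 : List Int) (arreglo2 : List Int) (personas : List Int) (n : Int) (out : List Int × List Int) : Prop := out = equilibraImpar_alt arreglo1 arreglo2 personas n
instance (arreglo1 : List Int) (arreglo2 : List Int) (personas : List Int) (n : Int) (out : List Int × List Int) : Decidable (Spec_equilibraImpar arreglo1 arreglo2 personas n out) := by unfold Spec_equilibraImpar; infer_instance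

-- ===== CLAIM (what is proved, stated in full; the proofs are below) =====
def Claim_equal_equilibraImpar : Prop := ∀ (arreglo1 : List Int) (arreglo2 : List Int) (personas : List Int) (n : Int), Dom_equilibraImpar arreglo1 arreglo2 personas n → Spec_equilibraImpar arreglo1 arreglo2 personas n (equilibraImpar arreglo1 arreglo2 personas n)

-- ===== LEMMAS AND PROOFS =====

theorem equilibraImpar_eq_alt (personas : List Int) (arreglo1 arreglo2 : List Int) (n : Int) :
    equilibraImpar arreglo1 arreglo2 personas n = equilibraImpar_alt arreglo1 arreglo2 personas n := by
  induction personas generalizing arreglo1 arreglo2 with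
  | nil =>
    simp [equilibraImpar, equilibraImpar_alt]
    rw [PySem.List.slice_to _ (le_max_left _ _), PySem.List.slice_from _ (le_max_left _ _)]
    simp
  | cons x rest ih =>
    have hk0 : (0:Int) ≤ max 0 (((x :: rest).length : Int) - PySem.Int.floordiv n 2) := le_max_left _ _
    have hk0' : (0:Int) ≤ max 0 ((rest.length : Int) - PySem.Int.floordiv n 2) := le_max_left _ _
    rw [equilibraImpar]
    split_ifs with h
    · rw [ih]
      unfold equilibraImpar_alt
      simp only
      rw [PySem.List.slice_from _ hk0, PySem.List.slice_to _ hk0,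
          PySem.List.slice_from _ hk0', PySem.List.slice_to _ hk0']
      have hlen : ((x :: rest).length : Int) = (rest.length : Int) + 1 := by
        simp
      have hk : (max 0 (((x :: rest).length : Int) - PySem.Int.floordiv n 2)).toNat
              = (max 0 ((rest.length : Int) - PySem.Int.floordiv n 2)).toNat + 1 := by
        rw [hlen] at h ⊢; omega
      rw [hk]
      simp [List.take_succ_cons, List.drop_succ_cons]
    · -- here (x :: rest).length ≤ n // 2, so the split index is 0 on both sides
      rw [ih]
      unfold equilibraImpar_alt
      simp only
      have hk : max 0 (((x :: rest).length : Int) - PySem.Int.floordiv n 2) = 0 := by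
        have hlen : ((x :: rest).length : Int) = (rest.length : Int) + 1 := by
          simp
        rw [hlen] at h ⊢; omega
      have hk' : max 0 ((rest.length : Int) - PySem.Int.floordiv n 2) = 0 := by
        have hlen : ((x :: rest).length : Int) = (rest.length : Int) + 1 := by
          simp
        rw [hlen] at h; omega
      rw [hk, hk']
      rw [PySem.List.slice_from _ le_rfl, PySem.List.slice_to _ le_rfl,
          PySem.List.slice_from _ le_rfl, PySem.List.slice_to _ le_rfl]
      simp

-- ===== VERDICT (by name: the statement is the Claim_ definition above) =====
theorem equilibraImpar_spec : Claim_equal_equilibraImpar := by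
  intro a1 a2 p n _
  unfold Spec_equilibraImpar
  exact equilibraImpar_eq_alt p a1 a2 n
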